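-- pv_equiv track=rewrite | github.com/dmarek03/INTRODUCTION_TO_COMPUTER_SCIENCE | ZESTAW_2/ZAD_8.py | zad_8
-- ===== SOURCE A (Python) =====
-- def zad_8(t: list[int]) -> bool:
--     n = len(t)
--     t1 = [False for _ in range(n)]
--     t1[0] = True
--     for i in range(n):
--         if t1[i]:
--             k = 2
--             while t[i] > 1:
--                 while t[i] % k == 0:
--                     if i + k < n:
--                         t1[i + k] = True
--                     t[i] //= k
--                 k += 1
--
--     return t1[-1]
-- ===== SOURCE B (Python) =====
-- def zad_8(t: list[int]) -> bool:
--     n = len(t)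
--     reach = [False] * n
--     reach[0] = True
--     for i in range(n):
--         if reach[i]:
--             v = t[i]
--             if v > 1:
--                 p = 2
--                 while p * p <= v:
--                     if v % p == 0:
--                         while v % p == 0:
--                             v //= p
--                         if i + p < n:
--                             reach[i + p] = True
--                     p += 1
--                 if v > 1 and i + v < n:
--                     reach[i + v] = True
--     return reach[-1]
-- ===== Notes on version B (the rewrite author's own statement) =====
-- stated objective: faster
-- what changed: B factors each reachable t[i] by trial division only up to sqrt(t[i]) and marks the remaining cofactor as the last prime factor, instead of A's trial division with k running all the way up to the value itself; B also does not mutate the input list.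
import Mathlib
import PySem

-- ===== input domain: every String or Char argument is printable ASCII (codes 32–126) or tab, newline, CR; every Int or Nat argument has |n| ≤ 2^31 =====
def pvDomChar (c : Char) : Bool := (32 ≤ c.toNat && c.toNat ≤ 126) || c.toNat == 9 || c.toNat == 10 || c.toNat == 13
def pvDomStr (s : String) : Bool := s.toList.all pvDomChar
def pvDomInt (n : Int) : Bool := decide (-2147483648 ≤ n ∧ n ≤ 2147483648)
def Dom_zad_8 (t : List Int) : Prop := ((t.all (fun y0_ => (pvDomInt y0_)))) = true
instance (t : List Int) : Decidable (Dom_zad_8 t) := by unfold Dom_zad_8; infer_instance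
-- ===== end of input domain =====

-- B replaces A's full trial division of t[i] (k running up to the value itself) by trial
-- division up to √t[i], marking the remaining cofactor as the last prime factor; same forward
-- reachability marking.  A mutates its argument list in place (t[i] //= k); B does not.
-- The equivalence proved here is about the RETURN value only.
-- The while loops are ported with a Nat fuel argument as a pure totality guard: each call site
-- passes fuel strictly larger than the loop's possible iteration count (proved in the lemmas),
-- so the fuel-exhaustion branch is never taken on any input.

-- ===== PORT A =====
-- t1[i+k] = True guarded by 'if i + k < n' (indices reached are ≥ 2, so .toNat is exact)
def pvMark (t1 : List Bool) (j n : Int) : List Bool :=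
  if j < n then t1.set j.toNat true else t1

-- inner 'while t[i] % k == 0': mark i+k, divide.  The conjuncts 0 < v and 2 ≤ k are totality
-- guards only: whenever Python reaches this loop they hold (k starts at 2, v stays ≥ 1).
def pvADiv : Nat → Int → Int → Int → Int → List Bool → Int × List Bool
  | 0, v, _, _, _, t1 => (v, t1)
  | fuel + 1, v, k, i, n, t1 =>
    if 0 < v ∧ 2 ≤ k ∧ PySem.Int.mod v k = 0 then
      pvADiv fuel (PySem.Int.floordiv v k) k i n (pvMark t1 (i + k) n)
    else (v, t1)

-- outer 'while t[i] > 1':  the conjuncts 2 ≤ k and k ≤ v are totality guards only: at every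
-- state Python reaches, v > 1 has no divisor below k, so its smallest prime factor is
-- between k and v, hence k ≤ v.
def pvALoop : Nat → Int → Int → Int → Int → List Bool → List Bool
  | 0, _, _, _, _, t1 => t1
  | fuel + 1, v, k, i, n, t1 =>
    if 1 < v ∧ 2 ≤ k ∧ k ≤ v then
      pvALoop fuel (pvADiv (v.natAbs + 1) v k i n t1).1 (k + 1) i n
        (pvADiv (v.natAbs + 1) v k i n t1).2
    else t1

def zad_8 (t : List Int) : Bool :=
  PySem.List.pyGetD
    ((PySem.List.pyRange 0 (t.length : Int) 1).foldl
      (fun acc i =>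
        if PySem.List.pyGetD acc i false then
          pvALoop ((PySem.List.pyGetD t i 0).natAbs + 1) (PySem.List.pyGetD t i 0) 2 i
            (t.length : Int) acc
        else acc)
      ((List.replicate t.length false).set 0 true))
    (-1) false

-- ===== PORT B =====
-- inner 'while v % p == 0: v //= p'  (0 < v and 2 ≤ p are totality guards; true when reached)
def pvBStrip : Nat → Int → Int → Int
  | 0, v, _ => v
  | fuel + 1, v, p =>
    if 0 < v ∧ 2 ≤ p ∧ PySem.Int.mod v p = 0 then
      pvBStrip fuel (PySem.Int.floordiv v p) p
    else v

-- 'while p * p <= v'  (2 ≤ p is a totality guard; p starts at 2 and only grows)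
def pvBLoop : Nat → Int → Int → Int → Int → List Bool → Int × List Bool
  | 0, v, _, _, _, t1 => (v, t1)
  | fuel + 1, v, p, i, n, t1 =>
    if 2 ≤ p ∧ p * p ≤ v then
      if PySem.Int.mod v p = 0 then
        pvBLoop fuel (pvBStrip (v.natAbs + 1) v p) (p + 1) i n (pvMark t1 (i + p) n)
      else
        pvBLoop fuel v (p + 1) i n t1
    else (v, t1)

def zad_8_alt (t : List Int) : Bool :=
  PySem.List.pyGetD
    ((PySem.List.pyRange 0 (t.length : Int) 1).foldl
      (fun acc i =>
        if PySem.List.pyGetD acc i false then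
          if 1 < PySem.List.pyGetD t i 0 then
            if 1 < (pvBLoop ((PySem.List.pyGetD t i 0).natAbs + 1) (PySem.List.pyGetD t i 0) 2 i (t.length : Int) acc).1 ∧
                i + (pvBLoop ((PySem.List.pyGetD t i 0).natAbs + 1) (PySem.List.pyGetD t i 0) 2 i (t.length : Int) acc).1 < (t.length : Int) then
              (pvBLoop ((PySem.List.pyGetD t i 0).natAbs + 1) (PySem.List.pyGetD t i 0) 2 i (t.length : Int) acc).2.set
                (i + (pvBLoop ((PySem.List.pyGetD t i 0).natAbs + 1) (PySem.List.pyGetD t i 0) 2 i (t.length : Int) acc).1).toNat true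
            else (pvBLoop ((PySem.List.pyGetD t i 0).natAbs + 1) (PySem.List.pyGetD t i 0) 2 i (t.length : Int) acc).2
          else acc
        else acc)
      ((List.replicate t.length false).set 0 true))
    (-1) false

-- ===== PRECONDITION & SPEC =====
-- Pre_ excludes only the empty list, on which Python A raises IndexError (t1[0] = True)
def Pre_zad_8 (t : List Int) : Prop := t ≠ []
instance (t : List Int) : Decidable (Pre_zad_8 t) := by unfold Pre_zad_8; infer_instance
def pvWitness_zad_8 : List Int := [6, 5, 1, 9, 7, 0]
def Spec_zad_8 (t : List Int) (out : Bool) : Prop := out = zad_8_alt t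
instance (t : List Int) (out : Bool) : Decidable (Spec_zad_8 t out) := by unfold Spec_zad_8; infer_instance

-- ===== CLAIM (what is proved, stated in full; the proofs are below) =====
def Claim_equal_zad_8 : Prop := ∀ (t : List Int), Dom_zad_8 t → Pre_zad_8 t → Spec_zad_8 t (zad_8 t)

-- ===== LEMMAS AND PROOFS =====

theorem pvEdivLt (a b : Int) (ha : 0 < a) (hb : 1 < b) : a / b < a := by
  have h1 := Int.mul_ediv_add_emod a b
  have h2 := Int.emod_nonneg a (by omega : b ≠ 0)
  have h3 := Int.emod_lt_of_pos a (by omega : 0 < b)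
  have h4 : 0 ≤ a / b := Int.ediv_nonneg (by omega) (by omega)
  nlinarith [h1, h2, h3, h4]

theorem pvEdivPos (a b : Int) (ha : 0 < a) (hb : 0 < b) (hd : b ∣ a) : 0 < a / b := by
  rcases hd with ⟨c, hc⟩
  have : a / b = c := by rw [hc, Int.mul_ediv_cancel_left _ (by omega)]
  nlinarith [this, hc]

-- the division step: positive, strictly smaller, and a divisor of v
theorem pvFloordivFacts (v k : Int) (h0 : 0 < v) (hk : 2 ≤ k)
    (hmod : PySem.Int.mod v k = 0) :
    0 < PySem.Int.floordiv v k ∧ PySem.Int.floordiv v k < v ∧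
      PySem.Int.floordiv v k ∣ v := by
  have hkpos : (0:Int) < k := by omega
  have hdvd : k ∣ v := (PySem.Int.mod_eq_zero_iff_dvd v k).1 hmod
  rcases hdvd with ⟨c, hc⟩
  have hfd : PySem.Int.floordiv v k = c := by
    rw [PySem.Int.floordiv_eq_ediv_of_pos hkpos, hc,
      Int.mul_ediv_cancel_left _ (by omega : k ≠ 0)]
  refine ⟨?_, ?_, ?_⟩
  · rw [PySem.Int.floordiv_eq_ediv_of_pos hkpos]
    exact pvEdivPos v k h0 (by omega) ⟨c, hc⟩
  · rw [PySem.Int.floordiv_eq_ediv_of_pos hkpos]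
    exact pvEdivLt v k h0 (by omega)
  · rw [hfd]; exact ⟨k, by linarith [hc, mul_comm k c]⟩

theorem pvMark_idem (t1 : List Bool) (j n : Int) :
    pvMark (pvMark t1 j n) j n = pvMark t1 j n := by
  unfold pvMark; split_ifs <;> simp [List.set_set]

theorem pvBStrip_pos_le (f : Nat) : ∀ (v p : Int), 0 < v →
    0 < pvBStrip f v p ∧ pvBStrip f v p ≤ v := by
  induction f with
  | zero => intro v p hv; exact ⟨hv, le_refl v⟩
  | succ f ih =>
      intro v p hv
      rw [pvBStrip]
      split_ifs with h
      · rcases h with ⟨h0, hp, hmod⟩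
        rcases pvFloordivFacts v p h0 hp hmod with ⟨h1, h2, _⟩
        rcases ih (PySem.Int.floordiv v p) p h1 with ⟨ha, hb⟩
        exact ⟨ha, by omega⟩
      · exact ⟨hv, le_refl v⟩

theorem pvBStrip_dvd (f : Nat) : ∀ (v p : Int), 0 < v → pvBStrip f v p ∣ v := by
  induction f with
  | zero => intro v p _; exact dvd_rfl
  | succ f ih =>
      intro v p hv
      rw [pvBStrip]
      split_ifs with h
      · rcases h with ⟨h0, hp, hmod⟩
        rcases pvFloordivFacts v p h0 hp hmod with ⟨h1, _, h3⟩
        exact (ih (PySem.Int.floordiv v p) p h1).trans h3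
      · exact dvd_rfl

theorem pvBStrip_not_dvd (f : Nat) : ∀ (v p : Int), v.natAbs < f → 0 < v → 2 ≤ p →
    ¬ (p ∣ pvBStrip f v p) := by
  induction f with
  | zero => intro v p hf; omega
  | succ f ih =>
      intro v p hf hv hp
      rw [pvBStrip]
      split_ifs with h
      · rcases h with ⟨h0, hp2, hmod⟩
        rcases pvFloordivFacts v p h0 hp2 hmod with ⟨h1, h2, _⟩
        exact ih (PySem.Int.floordiv v p) p (by omega) h1 hp
      · intro hdvd
        exact h ⟨hv, hp, (PySem.Int.mod_eq_zero_iff_dvd v p).2 hdvd⟩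

theorem pvBStrip_self (f : Nat) (v : Int) (hf : v.natAbs < f) (hv : 1 < v) :
    pvBStrip f v v = 1 := by
  have hmod : PySem.Int.mod v v = 0 := (PySem.Int.mod_eq_zero_iff_dvd v v).2 dvd_rfl
  have hfd : PySem.Int.floordiv v v = 1 := by
    rw [PySem.Int.floordiv_eq_ediv_of_pos (by omega), Int.ediv_self (by omega : v ≠ 0)]
  have hone : ∀ g : Nat, pvBStrip g 1 v = 1 := by
    intro g
    cases g with
    | zero => rfl
    | succ g =>
        rw [pvBStrip]
        rw [if_neg]
        rintro ⟨_, h2, hm⟩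
        rw [PySem.Int.mod_eq_emod_of_pos (by omega),
          Int.emod_eq_of_lt (by omega) (by omega)] at hm
        omega
  cases f with
  | zero => omega
  | succ f =>
      rw [pvBStrip, if_pos ⟨by omega, by omega, hmod⟩, hfd, hone f]

theorem pvADiv_eq_strip (f : Nat) : ∀ (v k i n : Int) (t1 : List Bool),
    v.natAbs < f → 0 < v → 2 ≤ k →
    pvADiv f v k i n t1 =
      (pvBStrip f v k, if PySem.Int.mod v k = 0 then pvMark t1 (i + k) n else t1) := by
  induction f with
  | zero => intro v k i n t1 hf; omega
  | succ f ih =>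
      intro v k i n t1 hf hv hk
      rw [pvADiv, pvBStrip]
      by_cases hmod : PySem.Int.mod v k = 0
      · rcases pvFloordivFacts v k hv hk hmod with ⟨h1, h2, _⟩
        rw [if_pos ⟨hv, hk, hmod⟩, if_pos ⟨hv, hk, hmod⟩, if_pos hmod,
          ih (PySem.Int.floordiv v k) k i n (pvMark t1 (i + k) n) (by omega) h1 hk]
        split_ifs with h3
        · rw [pvMark_idem]
        · rfl
      · rw [if_neg (fun hh => hmod hh.2.2), if_neg (fun hh => hmod hh.2.2), if_neg hmod]

-- the loop body does nothing once v ≤ 1 (any fuel)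
theorem pvALoop_stop (f : Nat) (v k i n : Int) (t1 : List Bool) (hv : ¬ 1 < v) :
    pvALoop f v k i n t1 = t1 := by
  cases f with
  | zero => rfl
  | succ f => rw [pvALoop, if_neg (fun hh => hv hh.1)]

theorem pvBLoop_stop (f : Nat) (v p i n : Int) (t1 : List Bool)
    (h : ¬ (2 ≤ p ∧ p * p ≤ v)) : pvBLoop f v p i n t1 = (v, t1) := by
  cases f with
  | zero => rfl
  | succ f => rw [pvBLoop, if_neg h]

-- A's trial division on a value with no proper divisor walks k up to v and marks i + v
theorem pvALoop_prime (f : Nat) : ∀ (v k i n : Int) (t1 : List Bool),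
    (v - k).toNat < f → 1 < v → 2 ≤ k → k ≤ v →
    (∀ d : Int, 2 ≤ d → d < v → ¬ (d ∣ v)) →
    pvALoop f v k i n t1 = pvMark t1 (i + v) n := by
  induction f with
  | zero => intro v k i n t1 hf; omega
  | succ f ih =>
      intro v k i n t1 hf hv hk hkv hprime
      rw [pvALoop, if_pos ⟨hv, hk, hkv⟩]
      rcases eq_or_lt_of_le hkv with heq | hlt
      · -- k = v: full division round leaves 1, marks i + v, loop exits
        have hmod : PySem.Int.mod v k = 0 := by
          rw [heq]; exact (PySem.Int.mod_eq_zero_iff_dvd v v).2 dvd_rfl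
        rw [pvADiv_eq_strip (v.natAbs + 1) v k i n t1 (by omega) (by omega) hk,
          if_pos hmod, heq, pvBStrip_self (v.natAbs + 1) v (by omega) hv]
        exact pvALoop_stop f 1 (v + 1) i n _ (by omega)
      · -- k < v: k does not divide v, move on to k + 1
        have hmod : ¬ PySem.Int.mod v k = 0 := by
          intro hm'
          exact hprime k hk hlt ((PySem.Int.mod_eq_zero_iff_dvd v k).1 hm')
        rw [pvADiv_eq_strip (v.natAbs + 1) v k i n t1 (by omega) (by omega) hk,
          if_neg hmod]
        have hstrip : pvBStrip (v.natAbs + 1) v k = v := by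
          rw [pvBStrip, if_neg (fun hc => hmod hc.2.2)]
        rw [hstrip]
        exact ih v (k + 1) i n t1 (by omega) hv (by omega) (by omega) hprime

-- main simulation: from any state (v, k) where v > 0 has no divisor in [2, k),
-- A's remaining trial division equals B's √-bounded loop plus the final cofactor mark
theorem pvLoop_sim (fa : Nat) : ∀ (fb : Nat) (v k i n : Int) (t1 : List Bool),
    v.natAbs + 1 - k.natAbs ≤ fa → v.natAbs + 1 - k.natAbs ≤ fb → 0 < v → 2 ≤ k →
    (∀ d : Int, 2 ≤ d → d < k → ¬ (d ∣ v)) →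
    pvALoop fa v k i n t1 =
      (if 1 < (pvBLoop fb v k i n t1).1
       then pvMark (pvBLoop fb v k i n t1).2 (i + (pvBLoop fb v k i n t1).1) n
       else (pvBLoop fb v k i n t1).2) := by
  induction fa with
  | zero =>
      intro fb v k i n t1 hfa hfb hv hk hnd
      -- measure 0 forces v < k, hence k * k > v: B's loop is already finished
      have hvk : v < k := by omega
      rw [pvBLoop_stop fb v k i n t1 (by rintro ⟨hk2, hkkle⟩; nlinarith)]
      by_cases hv1 : 1 < v
      · exact absurd dvd_rfl (hnd v (by omega) hvk)
      · rw [if_neg (by omega)]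
        rfl
  | succ fa ih =>
      intro fb v k i n t1 hfa hfb hv hk hnd
      by_cases hkk : k * k ≤ v
      · -- k² ≤ v: both loops take one step on trial divisor k
        have hkle : k ≤ v := by nlinarith
        have hv1 : 1 < v := by nlinarith
        cases fb with
        | zero => omega
        | succ fb =>
            by_cases hmod : PySem.Int.mod v k = 0
            · have hA : pvALoop (fa + 1) v k i n t1 =
                  pvALoop fa (pvBStrip (v.natAbs + 1) v k) (k + 1) i n (pvMark t1 (i + k) n) := by
                rw [pvALoop, if_pos ⟨hv1, hk, hkle⟩,
                  pvADiv_eq_strip (v.natAbs + 1) v k i n t1 (by omega) hv hk, if_pos hmod]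
              have hB : pvBLoop (fb + 1) v k i n t1 =
                  pvBLoop fb (pvBStrip (v.natAbs + 1) v k) (k + 1) i n (pvMark t1 (i + k) n) := by
                rw [pvBLoop, if_pos ⟨hk, hkk⟩, if_pos hmod]
              rw [hA, hB]
              have hpos : 0 < pvBStrip (v.natAbs + 1) v k :=
                (pvBStrip_pos_le (v.natAbs + 1) v k hv).1
              have hle : pvBStrip (v.natAbs + 1) v k ≤ v :=
                (pvBStrip_pos_le (v.natAbs + 1) v k hv).2
              refine ih fb (pvBStrip (v.natAbs + 1) v k) (k + 1) i n
                (pvMark t1 (i + k) n) (by omega) (by omega) hpos (by omega) ?_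
              intro d hd2 hdk1 hdvd
              rcases lt_or_ge d k with hdk | hdk
              · exact hnd d hd2 hdk (hdvd.trans (pvBStrip_dvd (v.natAbs + 1) v k hv))
              · have hdek : d = k := by omega
                rw [hdek] at hdvd
                exact pvBStrip_not_dvd (v.natAbs + 1) v k (by omega) hv hk hdvd
            · have hstrip : pvBStrip (v.natAbs + 1) v k = v := by
                rw [pvBStrip, if_neg (fun hc => hmod hc.2.2)]
              have hA : pvALoop (fa + 1) v k i n t1 = pvALoop fa v (k + 1) i n t1 := by
                rw [pvALoop, if_pos ⟨hv1, hk, hkle⟩,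
                  pvADiv_eq_strip (v.natAbs + 1) v k i n t1 (by omega) hv hk, if_neg hmod,
                  hstrip]
              have hB : pvBLoop (fb + 1) v k i n t1 = pvBLoop fb v (k + 1) i n t1 := by
                rw [pvBLoop, if_pos ⟨hk, hkk⟩, if_neg hmod]
              rw [hA, hB]
              refine ih fb v (k + 1) i n t1 (by omega) (by omega) hv (by omega) ?_
              intro d hd2 hdk1 hdvd
              rcases lt_or_ge d k with hdk | hdk
              · exact hnd d hd2 hdk hdvd
              · have hdek : d = k := by omega
                rw [hdek] at hdvd
                exact hmod ((PySem.Int.mod_eq_zero_iff_dvd v k).2 hdvd)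
      · -- k² > v: B's loop is finished; v is 1 or has no proper divisor
        rw [pvBLoop_stop fb v k i n t1 (fun hh => hkk hh.2)]
        by_cases hv1 : 1 < v
        · have hprime : ∀ d : Int, 2 ≤ d → d < v → ¬ (d ∣ v) := by
            intro d hd2 hdv hdvd
            rcases hdvd with ⟨e, he⟩
            have hepos : 0 < e := by nlinarith
            have he2 : 2 ≤ e := by
              have h1 : e ≠ 1 := by intro h1; rw [h1, mul_one] at he; omega
              omega
            have hdor : d < k ∨ e < k := by
              by_contra hcon
              push_neg at hcon
              nlinarith [hcon.1, hcon.2]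
            rcases hdor with h1 | h1
            · exact hnd d hd2 h1 ⟨e, he⟩
            · exact hnd e he2 h1 ⟨d, by linarith [he, mul_comm d e]⟩
          have hkv : k ≤ v := by
            by_contra hcon
            push_neg at hcon
            exact hnd v (by omega) hcon dvd_rfl
          rw [if_pos hv1]
          exact pvALoop_prime (fa + 1) v k i n t1 (by omega) hv1 hk hkv hprime
        · rw [pvALoop_stop (fa + 1) v k i n t1 hv1, if_neg (by omega)]

theorem pvStep_eq (t : List Int) (n : Int) :
    (fun (acc : List Bool) (i : Int) =>
      if PySem.List.pyGetD acc i false then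
        pvALoop ((PySem.List.pyGetD t i 0).natAbs + 1) (PySem.List.pyGetD t i 0) 2 i n acc
      else acc) =
    (fun (acc : List Bool) (i : Int) =>
      if PySem.List.pyGetD acc i false then
        if 1 < PySem.List.pyGetD t i 0 then
          if 1 < (pvBLoop ((PySem.List.pyGetD t i 0).natAbs + 1) (PySem.List.pyGetD t i 0) 2 i n acc).1 ∧
              i + (pvBLoop ((PySem.List.pyGetD t i 0).natAbs + 1) (PySem.List.pyGetD t i 0) 2 i n acc).1 < n then
            (pvBLoop ((PySem.List.pyGetD t i 0).natAbs + 1) (PySem.List.pyGetD t i 0) 2 i n acc).2.set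
              (i + (pvBLoop ((PySem.List.pyGetD t i 0).natAbs + 1) (PySem.List.pyGetD t i 0) 2 i n acc).1).toNat true
          else (pvBLoop ((PySem.List.pyGetD t i 0).natAbs + 1) (PySem.List.pyGetD t i 0) 2 i n acc).2
        else acc
      else acc) := by
  funext acc i
  by_cases hget : PySem.List.pyGetD acc i false
  · rw [if_pos hget, if_pos hget]
    by_cases hv : 1 < PySem.List.pyGetD t i 0
    · rw [if_pos hv]
      rw [pvLoop_sim ((PySem.List.pyGetD t i 0).natAbs + 1)
        ((PySem.List.pyGetD t i 0).natAbs + 1) (PySem.List.pyGetD t i 0) 2 i n acc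
        (by omega) (by omega) (by omega) (le_refl _) (by intro d hd2 hdk; omega)]
      simp only [pvMark]
      split_ifs <;> first | rfl | omega
    · rw [if_neg hv,
        pvALoop_stop ((PySem.List.pyGetD t i 0).natAbs + 1) (PySem.List.pyGetD t i 0) 2 i n acc hv]
  · rw [if_neg hget, if_neg hget]

theorem zad_8_eq_alt (t : List Int) : zad_8 t = zad_8_alt t := by
  unfold zad_8 zad_8_alt
  rw [pvStep_eq t (t.length : Int)]

-- ===== VERDICT (by name: the statement is the Claim_ definition above) =====
theorem zad_8_spec : Claim_equal_zad_8 := by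
  intro t _ _
  unfold Spec_zad_8
  exact zad_8_eq_alt t
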